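-- pv_equiv track=rewrite | github.com/hypergraphman/2GruppaEGE24 | task5/other_6.py | f
-- ===== SOURCE A (Python) =====
-- def n_to_p(n, p):
--     r = []
--     while n > 0:
--         r = [n % p] + r
--         n //= p
--     return r
--
-- def f(n):
--     s1 = n_to_p(n, 80)
--     sum_odd = sum_even = 0
--     for el in s1:
--         if el % 2 == 0:
--             sum_even += el
--         else:
--             sum_odd += el
--     if sum_odd > sum_even:
--         s1.append(n_to_p(sum_odd, 80)[-1])
--     else:
--         s1.append(n_to_p(sum_even, 80)[-1])
--     # sum_odd = sum_even = 0
--     # for el in s1: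
--     if s1[-1] % 2 == 0:
--         sum_even += s1[-1]
--     else:
--         sum_odd += s1[-1]
--     if sum_odd > sum_even:
--         s1.append(n_to_p(sum_odd, 80)[-1])
--     else:
--         s1.append(n_to_p(sum_even, 80)[-1])
--     res = 0
--     for i in range(0, len(s1)):
--         res += s1[i] * 80**(len(s1) - 1 - i)
--     return res
-- ===== SOURCE B (Python) =====
-- def f(n):
--     # single pass peeling base-80 digits, then closed-form reconstruction
--     se = so = 0
--     m = n
--     while m > 0:
--         d = m % 80
--         if d % 2 == 0:
--             se += d
--         else:
--             so += d
--         m //= 80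
--     d1 = (so if so > se else se) % 80
--     if d1 % 2 == 0:
--         se += d1
--     else:
--         so += d1
--     d2 = (so if so > se else se) % 80
--     return n * 6400 + d1 * 80 + d2
-- ===== Notes on version B (the rewrite author's own statement) =====
-- stated objective: simpler
-- what changed: One while-loop accumulates the parity sums while peeling base-80 digits (no digit list), the appended digits are taken with % 80 instead of n_to_p(...)[-1], and the result is the closed form n*6400 + d1*80 + d2 instead of rebuilding and re-evaluating the digit list.
-- outside the precondition, e.g. on f(0): A raises IndexError, B returns 0
import Mathlib
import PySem

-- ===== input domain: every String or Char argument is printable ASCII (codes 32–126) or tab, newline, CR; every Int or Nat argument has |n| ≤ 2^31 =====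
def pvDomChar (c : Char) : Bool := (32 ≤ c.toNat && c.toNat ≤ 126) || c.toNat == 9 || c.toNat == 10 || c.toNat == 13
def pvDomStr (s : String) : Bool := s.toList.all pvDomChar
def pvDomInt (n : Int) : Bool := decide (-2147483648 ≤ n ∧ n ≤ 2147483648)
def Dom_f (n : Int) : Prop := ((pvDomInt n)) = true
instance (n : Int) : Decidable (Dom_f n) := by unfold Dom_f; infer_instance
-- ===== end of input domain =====

-- B replaces A's digit-list building and re-evaluation by one digit-peeling loop over running
-- parity sums and a closed-form reconstruction n*6400 + d1*80 + d2 (objective: simpler).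

-- ===== PORT A =====
-- while n > 0: r = [n % p] + r; n //= p   (fuel = n.toNat is enough: n strictly shrinks under //80)
def n_to_p_loop (fuel : Nat) (n p : Int) (r : List Int) : List Int :=
  match fuel with
  | 0 => r
  | Nat.succ fuel =>
    if n > 0 then n_to_p_loop fuel (PySem.Int.floordiv n p) p (PySem.Int.mod n p :: r) else r

def n_to_p (n p : Int) : List Int := n_to_p_loop n.toNat n p []

def f (n : Int) : Int :=
  let s1 := n_to_p n 80
  let sums := s1.foldl
    (fun (q : Int × Int) el =>
      if PySem.Int.mod el 2 == 0 then (q.1 + el, q.2) else (q.1, q.2 + el)) (0, 0)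
  -- sums.1 = sum_even, sums.2 = sum_odd
  let s1 := if sums.2 > sums.1
    then s1 ++ [PySem.List.pyGetD (n_to_p sums.2 80) (-1) 0]
    else s1 ++ [PySem.List.pyGetD (n_to_p sums.1 80) (-1) 0]
  let last := PySem.List.pyGetD s1 (-1) 0
  let sums := if PySem.Int.mod last 2 == 0 then (sums.1 + last, sums.2) else (sums.1, sums.2 + last)
  let s1 := if sums.2 > sums.1
    then s1 ++ [PySem.List.pyGetD (n_to_p sums.2 80) (-1) 0]
    else s1 ++ [PySem.List.pyGetD (n_to_p sums.1 80) (-1) 0]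
  (PySem.List.pyRange 0 s1.length 1).foldl
    (fun res i => res + PySem.List.pyGetD s1 i 0 * 80 ^ (s1.length - 1 - i.toNat)) 0

-- ===== PORT B =====
def f_alt_loop (fuel : Nat) (m se so : Int) : Int × Int :=
  match fuel with
  | 0 => (se, so)
  | Nat.succ fuel =>
    if m > 0 then
      let d := PySem.Int.mod m 80
      if PySem.Int.mod d 2 == 0 then f_alt_loop fuel (PySem.Int.floordiv m 80) (se + d) so
      else f_alt_loop fuel (PySem.Int.floordiv m 80) se (so + d)
    else (se, so)

def f_alt (n : Int) : Int :=
  let q := f_alt_loop n.toNat n 0 0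
  let d1 := PySem.Int.mod (if q.2 > q.1 then q.2 else q.1) 80
  let q := if PySem.Int.mod d1 2 == 0 then (q.1 + d1, q.2) else (q.1, q.2 + d1)
  let d2 := PySem.Int.mod (if q.2 > q.1 then q.2 else q.1) 80
  n * 6400 + d1 * 80 + d2

-- ===== PRECONDITION & SPEC =====
-- A raises IndexError for every n ≤ 0 (n_to_p returns [] and [-1] fails), so exactly those
-- inputs are excluded; B returns n*6400 there.
def Pre_f (n : Int) : Prop := 0 < n
instance (n : Int) : Decidable (Pre_f n) := by unfold Pre_f; infer_instance
def pvWitness_f : Int := (481)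

def Spec_f (n : Int) (out : Int) : Prop := out = f_alt n
instance (n : Int) (out : Int) : Decidable (Spec_f n out) := by unfold Spec_f; infer_instance

-- ===== CLAIM (what is proved, stated in full; the proofs are below) =====
def Claim_equal_f : Prop := ∀ (n : Int), Dom_f n → Pre_f n → Spec_f n (f n)

-- ===== LEMMAS AND PROOFS =====

def digits (m : Int) : List Int :=
  if _h : 0 < m then digits (PySem.Int.floordiv m 80) ++ [PySem.Int.mod m 80] else []
termination_by m.toNat
decreasing_by
  rw [PySem.Int.floordiv_eq_ediv_of_pos (by norm_num)]
  omega

theorem digits_pos {m : Int} (h : 0 < m) :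
    digits m = digits (PySem.Int.floordiv m 80) ++ [PySem.Int.mod m 80] := by
  rw [digits]; simp [h]

theorem digits_nonpos {m : Int} (h : ¬ 0 < m) : digits m = [] := by
  rw [digits]; simp [h]

theorem floordiv80_toNat_lt {m : Int} (h : 0 < m) :
    (PySem.Int.floordiv m 80).toNat < m.toNat := by
  rw [PySem.Int.floordiv_eq_ediv_of_pos (by norm_num)]
  omega

theorem n_to_p_loop_eq : ∀ (fuel : Nat) (m : Int) (r : List Int), m.toNat ≤ fuel →
    n_to_p_loop fuel m 80 r = digits m ++ r := by
  intro fuel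
  induction fuel with
  | zero =>
    intro m r h
    have hm : ¬ 0 < m := by omega
    simp [n_to_p_loop, digits_nonpos hm]
  | succ k ih =>
    intro m r h
    by_cases hm : 0 < m
    · have hstep : n_to_p_loop (k+1) m 80 r
        = n_to_p_loop k (PySem.Int.floordiv m 80) 80 (PySem.Int.mod m 80 :: r) := by
        simp [n_to_p_loop, hm]
      rw [hstep, ih _ _ (by have := floordiv80_toNat_lt hm; omega), digits_pos hm]
      simp
    · simp [n_to_p_loop, hm, digits_nonpos hm]

theorem n_to_p_digits (m : Int) : n_to_p m 80 = digits m := by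
  unfold n_to_p
  rw [n_to_p_loop_eq _ _ _ le_rfl]; simp

def esum : List Int → Int
  | [] => 0
  | d :: t => (if PySem.Int.mod d 2 == 0 then d else 0) + esum t

def osum : List Int → Int
  | [] => 0
  | d :: t => (if PySem.Int.mod d 2 == 0 then 0 else d) + osum t

theorem esum_append (l1 l2 : List Int) : esum (l1 ++ l2) = esum l1 + esum l2 := by
  induction l1 with
  | nil => simp [esum]
  | cons d t ih => simp [esum, ih]; ring

theorem osum_append (l1 l2 : List Int) : osum (l1 ++ l2) = osum l1 + osum l2 := by
  induction l1 with
  | nil => simp [osum]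
  | cons d t ih => simp [osum, ih]; ring

theorem pairfold_eq : ∀ (l : List Int) (a b : Int),
    l.foldl (fun (q : Int × Int) el =>
      if PySem.Int.mod el 2 == 0 then (q.1 + el, q.2) else (q.1, q.2 + el)) (a, b)
    = (a + esum l, b + osum l) := by
  intro l
  induction l with
  | nil => intro a b; simp [esum, osum]
  | cons d t ih =>
    intro a b
    simp only [List.foldl_cons]
    by_cases hc : (PySem.Int.mod d 2 == 0) = true
    · rw [if_pos hc, ih]
      simp only [esum, osum, if_pos hc, Prod.ext_iff]
      constructor <;> ring
    · rw [if_neg hc, ih]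
      simp only [esum, osum, if_neg hc, Prod.ext_iff]
      constructor <;> ring

theorem altloop_eq : ∀ (fuel : Nat) (m se so : Int), m.toNat ≤ fuel →
    f_alt_loop fuel m se so = (se + esum (digits m), so + osum (digits m)) := by
  intro fuel
  induction fuel with
  | zero =>
    intro m se so h
    have hm : ¬ 0 < m := by omega
    simp [f_alt_loop, digits_nonpos hm, esum, osum]
  | succ k ih =>
    intro m se so h
    by_cases hm : 0 < m
    · have hb : (PySem.Int.floordiv m 80).toNat ≤ k := by
        have := floordiv80_toNat_lt hm; omega
      rw [digits_pos hm, esum_append, osum_append]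
      simp only [f_alt_loop, if_pos hm]
      by_cases hc : (PySem.Int.mod (PySem.Int.mod m 80) 2 == 0) = true
      · rw [if_pos hc, ih _ _ _ hb]
        simp only [esum, osum, if_pos hc, Prod.ext_iff]
        constructor <;> ring
      · rw [if_neg hc, ih _ _ _ hb]
        simp only [esum, osum, if_neg hc, Prod.ext_iff]
        constructor <;> ring
    · simp [f_alt_loop, hm, digits_nonpos hm, esum, osum]

theorem n_to_p_last {s : Int} (h : 0 < s) :
    PySem.List.pyGetD (n_to_p s 80) (-1) 0 = PySem.Int.mod s 80 := by
  rw [n_to_p_digits, digits_pos h]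
  exact PySem.List.pyGetD_neg_one_append_singleton _ _ _

theorem sum_digits_pos : ∀ (k : Nat) (m : Int), m.toNat ≤ k → 0 < m →
    0 < esum (digits m) + osum (digits m) := by
  intro k
  induction k with
  | zero => intro m h hm; omega
  | succ k ih =>
    intro m h hm
    have hd : 0 ≤ PySem.Int.mod m 80 := PySem.Int.mod_nonneg m (by norm_num)
    rw [digits_pos hm, esum_append, osum_append]
    have hsingle : esum [PySem.Int.mod m 80] + osum [PySem.Int.mod m 80] = PySem.Int.mod m 80 := by
      simp only [esum, osum]
      split_ifs <;> ring
    by_cases hq : 0 < PySem.Int.floordiv m 80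
    · have := ih _ (by have := floordiv80_toNat_lt hm; omega) hq
      linarith
    · have hz : PySem.Int.floordiv m 80 = 0 := by
        rw [PySem.Int.floordiv_eq_ediv_of_pos (by norm_num)] at hq ⊢; omega
      have hmod : PySem.Int.mod m 80 = m := by
        have := PySem.Int.floordiv_mul_add_mod m 80
        rw [hz] at this; linarith
      rw [hz, digits_nonpos (by norm_num)]
      have he : esum [] = 0 := rfl
      have ho : osum [] = 0 := rfl
      linarith [hsingle]

def pval : List Int → Int
  | [] => 0
  | d :: t => d * 80 ^ t.length + pval t

theorem pval_append_singleton (l : List Int) (d : Int) :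
    pval (l ++ [d]) = pval l * 80 + d := by
  induction l with
  | nil => simp [pval]
  | cons a t ih =>
    simp only [List.cons_append, pval, ih, List.length_append, List.length_singleton]
    rw [pow_succ]
    ring

theorem digits_pval : ∀ (k : Nat) (m : Int), m.toNat ≤ k → 0 ≤ m → pval (digits m) = m := by
  intro k
  induction k with
  | zero =>
    intro m h hm
    have : ¬ 0 < m := by omega
    rw [digits_nonpos this]
    simp only [pval]
    omega
  | succ k ih =>
    intro m h hm
    by_cases hp : 0 < m
    · rw [digits_pos hp, pval_append_singleton]
      have hnn : 0 ≤ PySem.Int.floordiv m 80 := by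
        rw [PySem.Int.floordiv_eq_ediv_of_pos (by norm_num)]; omega
      rw [ih _ (by have := floordiv80_toNat_lt hp; omega) hnn]
      linarith [PySem.Int.floordiv_mul_add_mod m 80]
    · rw [digits_nonpos hp]; simp only [pval]; omega

theorem idx_fold : ∀ (l : List Int), ∀ (e : Nat) (a : Int),
    (List.range l.length).foldl (fun res k => res + l.getD k 0 * 80 ^ (l.length - 1 - k + e)) a
    = a + pval l * 80 ^ e := by
  intro l
  induction l using List.reverseRecOn with
  | nil => intro e a; simp [pval]
  | append_singleton t d ih =>
    intro e a
    rw [show (t ++ [d]).length = t.length + 1 by simp]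
    rw [List.range_succ, List.foldl_append]
    have hcong : (List.range t.length).foldl
        (fun res k => res + (t ++ [d]).getD k 0 * 80 ^ (t.length + 1 - 1 - k + e)) a
        = (List.range t.length).foldl
        (fun res k => res + t.getD k 0 * 80 ^ (t.length - 1 - k + (e + 1))) a := by
      apply PySem.List.foldl_congr_mem
      intro acc x hx
      have hxl : x < t.length := List.mem_range.mp hx
      have h1 : (t ++ [d]).getD x 0 = t.getD x 0 := by
        unfold List.getD
        rw [List.getElem?_append_left hxl]
      have h2 : t.length + 1 - 1 - x + e = t.length - 1 - x + (e + 1) := by omega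
      rw [h1, h2]
    rw [hcong, ih]
    simp only [List.foldl_cons, List.foldl_nil]
    have h3 : (t ++ [d]).getD t.length 0 = d := by
      unfold List.getD
      rw [List.getElem?_append_right le_rfl]
      simp
    have h4 : t.length + 1 - 1 - t.length + e = e := by omega
    rw [h3, h4, pval_append_singleton, pow_succ]
    ring

theorem res_eq (l : List Int) :
    (PySem.List.pyRange 0 (l.length : Int) 1).foldl
      (fun res i => res + PySem.List.pyGetD l i 0 * 80 ^ (l.length - 1 - i.toNat)) 0
    = pval l := by
  rw [PySem.List.pyRange_one, List.foldl_map]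
  rw [show ((l.length : Int) - 0).toNat = l.length by omega]
  simp only [zero_add, PySem.List.pyGetD_natCast, Int.toNat_natCast]
  have h := idx_fold l 0 0
  simpa using h

theorem closeA (n d1 d2 : Int) (hv : pval (digits n) = n) :
    (PySem.List.pyRange 0 (((digits n ++ [d1]) ++ [d2]).length : Int) 1).foldl
      (fun res i => res + PySem.List.pyGetD ((digits n ++ [d1]) ++ [d2]) i 0
        * 80 ^ (((digits n ++ [d1]) ++ [d2]).length - 1 - i.toNat)) 0
    = n * 6400 + d1 * 80 + d2 := by
  rw [res_eq, pval_append_singleton, pval_append_singleton, hv]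
  ring

theorem main_eq (n : Int) (hn : 0 < n) : f n = f_alt n := by
  simp only [f, f_alt]
  rw [n_to_p_digits, pairfold_eq, altloop_eq n.toNat n 0 0 le_rfl]
  simp only [zero_add]
  have hpos : 0 < esum (digits n) + osum (digits n) := sum_digits_pos n.toNat n le_rfl hn
  have hv : pval (digits n) = n := digits_pval n.toNat n le_rfl (by omega)
  set E := esum (digits n) with hE
  set O := osum (digits n) with hO
  by_cases h1 : E < O
  · have hOpos : 0 < O := by linarith
    have hd1nn : 0 ≤ PySem.Int.mod O 80 := PySem.Int.mod_nonneg O (by norm_num)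
    simp only [if_pos h1]
    rw [n_to_p_last hOpos, PySem.List.pyGetD_neg_one_append_singleton]
    set d1 := PySem.Int.mod O 80 with hd1
    by_cases h2 : (PySem.Int.mod d1 2 == 0) = true
    · simp only [if_pos h2]
      by_cases h3 : E + d1 < O
      · simp only [if_pos h3]
        rw [n_to_p_last hOpos]
        exact closeA n d1 _ hv
      · simp only [if_neg h3]
        have : 0 < E + d1 := by linarith
        rw [n_to_p_last this]
        exact closeA n d1 _ hv
    · simp only [if_neg h2]
      by_cases h3 : E < O + d1
      · simp only [if_pos h3]
        have : 0 < O + d1 := by linarith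
        rw [n_to_p_last this]
        exact closeA n d1 _ hv
      · simp only [if_neg h3]
        have : 0 < E := by linarith
        rw [n_to_p_last this]
        exact closeA n d1 _ hv
  · have hEpos : 0 < E := by linarith
    have hd1nn : 0 ≤ PySem.Int.mod E 80 := PySem.Int.mod_nonneg E (by norm_num)
    simp only [if_neg h1]
    rw [n_to_p_last hEpos, PySem.List.pyGetD_neg_one_append_singleton]
    set d1 := PySem.Int.mod E 80 with hd1
    by_cases h2 : (PySem.Int.mod d1 2 == 0) = true
    · simp only [if_pos h2]
      by_cases h3 : E + d1 < O
      · simp only [if_pos h3]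
        have : 0 < O := by linarith
        rw [n_to_p_last this]
        exact closeA n d1 _ hv
      · simp only [if_neg h3]
        have : 0 < E + d1 := by linarith
        rw [n_to_p_last this]
        exact closeA n d1 _ hv
    · simp only [if_neg h2]
      by_cases h3 : E < O + d1
      · simp only [if_pos h3]
        have : 0 < O + d1 := by linarith
        rw [n_to_p_last this]
        exact closeA n d1 _ hv
      · simp only [if_neg h3]
        rw [n_to_p_last hEpos]
        exact closeA n d1 _ hv

-- ===== VERDICT (by name: the statement is the Claim_ definition above) =====
theorem f_spec : Claim_equal_f := by
  intro n _ hpre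
  unfold Spec_f
  exact main_eq n hpre
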